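-- pv_equiv track=rewrite | github.com/sidou06/hackerrank-solutions | Mathematics/Geometry/Sherlock and Planes/Solution.py | solve
-- ===== SOURCE A (Python) =====
-- def det3(matrix):
--     a, b, c = matrix[0]
--     d, e, f = matrix[1]
--     g, h, i = matrix[2]
--     return a * (e * i - f * h) - b * (d * i - f * g) + c * (d * h - e * g)
--
-- def det4(matrix):
--     a, b, c, d = matrix[0]
--     e, f, g, h = matrix[1]
--     i, j, k, l = matrix[2]
--     m, n, o, p = matrix[3]
--
--     # Compute the cofactor expansion along the first row
--     fi = a * det3([[f, g, h], [j, k, l], [n, o, p]])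
--     se = b * det3([[e, g, h], [i, k, l], [m, o, p]])
--     th = c * det3([[e, f, h], [i, j, l], [m, n, p]])
--     fo = d * det3([[e, f, g], [i, j, k], [m, n, o]])
--
--     # Return the determinant
--     return fi - se + th - fo
--
-- def solve(points):
--     # Add a 1 as the fourth coordinate to each point
--     for i in range(len(points)):
--         points[i].append(1)
--
--     # Calculate the determinant
--     de = det4(points)
--
--     # If determinant is zero, the points are coplanar
--     if de == 0:
--         return "YES"
--     else:
--         return "NO"
-- ===== SOURCE B (Python) =====
-- def solve(points):
--     # Same observable mutation as the original: append 1 to every point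
--     for p in points:
--         p.append(1)
--
--     # Coplanarity via scalar triple product of edge vectors (pure ints, exact)
--     (x0, y0, z0), (x1, y1, z1), (x2, y2, z2), (x3, y3, z3) = (tuple(p[:3]) for p in points[:4])
--     ax, ay, az = x1 - x0, y1 - y0, z1 - z0
--     bx, by, bz = x2 - x0, y2 - y0, z2 - z0
--     cx, cy, cz = x3 - x0, y3 - y0, z3 - z0
--     t = ax * (by * cz - bz * cy) - ay * (bx * cz - bz * cx) + az * (bx * cy - by * cx)
--     return "YES" if t == 0 else "NO"
-- ===== Notes on version B (the rewrite author's own statement) =====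
-- stated objective: idiomatic
-- what changed: Replaces the hand-expanded 4x4 cofactor expansion (with appended homogeneous 1s) by the scalar triple product of the three edge vectors p1-p0, p2-p0, p3-p0, which equals minus that determinant, keeping the same in-place mutation.
import Mathlib
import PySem

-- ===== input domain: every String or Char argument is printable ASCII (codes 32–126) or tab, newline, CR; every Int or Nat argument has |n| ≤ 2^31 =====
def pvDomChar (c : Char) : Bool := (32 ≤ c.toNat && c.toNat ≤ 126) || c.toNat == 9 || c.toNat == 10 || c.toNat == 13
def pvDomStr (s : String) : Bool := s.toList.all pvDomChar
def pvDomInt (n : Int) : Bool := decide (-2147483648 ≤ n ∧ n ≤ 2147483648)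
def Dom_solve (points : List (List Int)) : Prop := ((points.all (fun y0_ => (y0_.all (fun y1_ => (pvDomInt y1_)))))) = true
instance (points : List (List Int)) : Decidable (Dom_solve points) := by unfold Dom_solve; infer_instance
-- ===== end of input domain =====

-- B replaces the 4x4 cofactor expansion by the scalar triple product of edge vectors;
-- both Pythons mutate `points` in place (append 1 to every row): only the RETURN value is compared here.

-- ===== PORT A =====
def det3A (m : List (List Int)) : Int :=
  match m with
  | [[a,b,c],[d,e,f],[g,h,i]] =>
      a * (e * i - f * h) - b * (d * i - f * g) + c * (d * h - e * g)
  | _ => 0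

def det4A (m : List (List Int)) : Int :=
  match m with
  | [a,b,c,d] :: [e,f,g,h] :: [i,j,k,l] :: [mm,n,o,p] :: _ =>
      a * det3A [[f,g,h],[j,k,l],[n,o,p]]
      - b * det3A [[e,g,h],[i,k,l],[mm,o,p]]
      + c * det3A [[e,f,h],[i,j,l],[mm,n,p]]
      - d * det3A [[e,f,g],[i,j,k],[mm,n,o]]
  | _ => 0

def solve (points : List (List Int)) : String :=
  let pts := points.map (fun r => r ++ [1])
  let de := det4A pts
  if de = 0 then "YES" else "NO"

-- ===== PORT B =====
def solve_alt (points : List (List Int)) : String :=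
  let pts := points.map (fun r => r ++ [1])
  match pts with
  | (x0::y0::z0::_) :: (x1::y1::z1::_) :: (x2::y2::z2::_) :: (x3::y3::z3::_) :: _ =>
      let ax := x1 - x0; let ay := y1 - y0; let az := z1 - z0
      let bx := x2 - x0; let by_ := y2 - y0; let bz := z2 - z0
      let cx := x3 - x0; let cy := y3 - y0; let cz := z3 - z0
      let t := ax * (by_ * cz - bz * cy) - ay * (bx * cz - bz * cx) + az * (bx * cy - by_ * cx)
      if t = 0 then "YES" else "NO"
  | _ => "NO"

-- ===== PRECONDITION & SPEC =====
-- Pre_ admits exactly the inputs where A returns: at least 4 points, the first four of length exactly 3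
-- (the row unpacks in det4/det3 raise ValueError otherwise).
def Pre_solve (points : List (List Int)) : Prop :=
  4 ≤ points.length ∧ ∀ r ∈ points.take 4, r.length = 3
instance (points : List (List Int)) : Decidable (Pre_solve points) := by unfold Pre_solve; infer_instance

def pvWitness_solve : List (List Int) := [[0,0,0],[1,0,0],[0,1,0],[1,1,0]]

def Spec_solve (points : List (List Int)) (out : String) : Prop := out = solve_alt points
instance (points : List (List Int)) (out : String) : Decidable (Spec_solve points out) := by unfold Spec_solve; infer_instance

-- ===== CLAIM (what is proved, stated in full; the proofs are below) =====
def Claim_equal_solve : Prop := ∀ (points : List (List Int)), Dom_solve points → Pre_solve points → Spec_solve points (solve points)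

-- ===== LEMMAS AND PROOFS =====

-- ===== VERDICT (by name: the statement is the Claim_ definition above) =====
lemma det_ite (A B : Int) (key : A = -B) :
    (if A = 0 then "YES" else "NO") = (if B = 0 then "YES" else "NO") := by
  rw [key]; simp [neg_eq_zero]

theorem solve_spec : Claim_equal_solve := by
  intro points _ hpre
  obtain ⟨hlen, hrows⟩ := hpre
  match points with
  | r0 :: r1 :: r2 :: r3 :: rest =>
    have h0 := hrows r0 (by simp)
    have h1 := hrows r1 (by simp)
    have h2 := hrows r2 (by simp)
    have h3 := hrows r3 (by simp)
    obtain ⟨a0, b0, c0, rfl⟩ := List.length_eq_three.mp h0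
    obtain ⟨a1, b1, c1, rfl⟩ := List.length_eq_three.mp h1
    obtain ⟨a2, b2, c2, rfl⟩ := List.length_eq_three.mp h2
    obtain ⟨a3, b3, c3, rfl⟩ := List.length_eq_three.mp h3
    show solve _ = solve_alt _
    simp only [solve, solve_alt, det4A, det3A, List.map, List.cons_append, List.nil_append]
    exact det_ite _ _ (by ring)
  | [] => simp at hlen
  | [_] => simp at hlen
  | [_, _] => simp at hlen
  | [_, _, _] => simp at hlen
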